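-- pv_equiv track=rewrite | github.com/marinaagafonova/OOP-Python | task4/task4 v2.py | checkable
-- ===== SOURCE A (Python) =====
-- def choose_root(roots):
--     max = len(roots[0])
--     res = roots[0]
--     for r in roots:
--         if max < len(r):
--             max = len(r)
--             res = r
--     return res
--
-- def checkable(word, vocabulary):
--     res = []
--
--     for v in vocabulary:
--         n = len(v)
--         i = 0
--         mistakes = 0
--         word = word.lower()
--         while(i+n<len(word)):
--             for j in range(n):
--                 if word[j+i] != v[j]:
--                     mistakes += 1
--                 if mistakes > 1:
--                     break
--             if mistakes == 1:
--                 res.append(v)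
--             if mistakes == 0:
--                 res.append(v)
--             mistakes = 0
--             i += 1
--     if len(res) > 1:
--         return choose_root(res)
--     elif len(res) == 1:
--         return res[0]
--     else:
--         return ""
-- ===== SOURCE B (Python) =====
-- def _matches(lw, v):
--     # does v match some window lw[i:i+len(v)] (with i+len(v) < len(lw)) with at most one mismatch?
--     n = len(v)
--     for i in range(len(lw) - n):
--         j = 0
--         while j < n and lw[i + j] == v[j]:
--             j += 1
--         if j == n or lw[i + j + 1:i + n] == v[j + 1:]:
--             return True
--     return False
--
-- def checkable(word, vocabulary):
--     lw = word.lower()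
--     best = ""
--     for v in vocabulary:
--         if len(v) > len(best) and _matches(lw, v):
--             best = v
--     return best
-- ===== Notes on version B (the rewrite author's own statement) =====
-- stated objective: faster
-- what changed: B keeps a single running best instead of A's collect-every-hit list plus a second longest-scan pass, skips entirely any vocabulary word not longer than the current best, and tests a window by walking to the first mismatch and comparing the two remaining tails as slices instead of counting mismatches per character.
import Mathlib
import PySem

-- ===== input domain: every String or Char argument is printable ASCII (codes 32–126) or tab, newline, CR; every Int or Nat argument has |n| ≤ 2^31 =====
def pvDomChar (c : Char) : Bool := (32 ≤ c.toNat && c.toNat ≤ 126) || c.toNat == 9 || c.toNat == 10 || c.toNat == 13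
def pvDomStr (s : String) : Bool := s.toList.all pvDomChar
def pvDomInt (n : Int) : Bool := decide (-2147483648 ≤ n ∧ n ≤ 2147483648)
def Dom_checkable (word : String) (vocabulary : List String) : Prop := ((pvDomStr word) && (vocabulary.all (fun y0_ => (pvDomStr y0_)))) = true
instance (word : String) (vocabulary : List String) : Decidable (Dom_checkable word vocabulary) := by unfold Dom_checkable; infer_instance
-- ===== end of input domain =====

-- B replaces A's "collect every (word,alignment) hit into a list and rescan it for the longest"
-- by a single fold that keeps the current best and skips candidates no longer than it;
-- the one-mismatch window test becomes "walk to the first mismatch, then compare the two tails as slices".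

-- ===== PORT A =====
-- the inner `for j in range(n)` loop: walks v from offset i in w, counting mistakes, breaking once they exceed 1
-- (w.getD is Python's word[j+i]; every call site has the index in range, so the default is never read)
def misA (w : List Char) (i : Nat) : List Char → Nat → Nat
  | [], m => m
  | c :: rest, m =>
    let m' := if w.getD i ' ' ≠ c then m + 1 else m
    if m' > 1 then m' else misA w (i + 1) rest m'

-- the `while i+n < len(word)` loop, appending v to res once per alignment with mistakes ≤ 1
def whileA (w : List Char) (v : String) (i : Nat) (res : List String) : List String :=
  if i + v.toList.length < w.length then
    let m := misA w i v.toList 0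
    let res1 := if m == 1 then res ++ [v] else res
    let res2 := if m == 0 then res1 ++ [v] else res1
    whileA w v (i + 1) res2
  else res
termination_by w.length - i
decreasing_by omega

def choose_root (roots : List String) : String :=
  match roots with
  | [] => ""   -- Python raises IndexError here; A only calls choose_root on a list of length > 1
  | h :: _ =>
    (roots.foldl (fun (st : Nat × String) r =>
      if st.1 < r.toList.length then (r.toList.length, r) else st) (h.toList.length, h)).2

-- the outer `for v in vocabulary` loop; A re-lowercases word at every iteration, so the
-- string is threaded through as state exactly as in the Python
def outerA : List String → String × List String → String × List String
  | [], st => st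
  | v :: rest, (wd, res) =>
    let wd' := PySem.Str.lower wd
    let res' := whileA wd'.toList v 0 res
    outerA rest (wd', res')

def checkable (word : String) (vocabulary : List String) : String :=
  let res := (outerA vocabulary (word, [])).2
  if res.length > 1 then choose_root res
  else if res.length == 1 then res.getD 0 ""
  else ""

-- ===== PORT B =====
-- length of the agreeing prefix of v against w starting at offset i (B's `while j < n and lw[i+j] == v[j]`)
def agreeLen (w : List Char) (i : Nat) : List Char → Nat
  | [] => 0
  | c :: rest => if w.getD i ' ' == c then agreeLen w (i + 1) rest + 1 else 0

-- Python's s[a:b] for 0 ≤ a ≤ b: drop/take with end-clamping, exactly the slice semantics B uses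
def mySlice (l : List Char) (a b : Nat) : List Char := (l.drop a).take (b - a)

-- B's window test: walk to the first mismatch, then the two remaining tails must be equal
def nearB (w v : List Char) (i : Nat) : Bool :=
  let j := agreeLen w i v
  j == v.length || mySlice w (i + j + 1) (i + v.length) == mySlice v (j + 1) v.length

-- B's `any(... for i in range(len(lw) - n))` (Nat subtraction is 0 exactly when Python's range is empty)
def matchesB (w v : List Char) : Bool :=
  (List.range (w.length - v.length)).any (fun i => nearB w v i)

def checkable_alt (word : String) (vocabulary : List String) : String :=
  let lw := (PySem.Str.lower word).toList
  vocabulary.foldl (fun best v =>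
    if best.toList.length < v.toList.length ∧ matchesB lw v.toList = true then v else best) ""

-- ===== PRECONDITION & SPEC =====
def Spec_checkable (word : String) (vocabulary : List String) (out : String) : Prop := out = checkable_alt word vocabulary
instance (word : String) (vocabulary : List String) (out : String) : Decidable (Spec_checkable word vocabulary out) := by unfold Spec_checkable; infer_instance

-- ===== CLAIM (what is proved, stated in full; the proofs are below) =====
def Claim_equal_checkable : Prop := ∀ (word : String) (vocabulary : List String), Dom_checkable word vocabulary → Spec_checkable word vocabulary (checkable word vocabulary)

-- ===== LEMMAS AND PROOFS =====

theorem lowerChar_idem (c : Char) : PySem.Chars.lowerChar (PySem.Chars.lowerChar c) = PySem.Chars.lowerChar c := by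
  unfold PySem.Chars.lowerChar PySem.Chars.isupper
  by_cases h : ('A' ≤ c ∧ c ≤ 'Z')
  · have h1 : 65 ≤ c.toNat := Fin.mk_le_mk.mp h.1
    have h2 : c.toNat ≤ 90 := Fin.mk_le_mk.mp h.2
    have hv : (c.toNat + 32).isValidChar := Or.inl (by omega)
    have ht : (Char.ofNat (c.toNat + 32)).toNat = c.toNat + 32 := by
      rw [Char.toNat_ofNat, if_pos hv]
    have hz : ¬ (Char.ofNat (c.toNat + 32) ≤ 'Z') := by
      intro hle
      have h3 : (Char.ofNat (c.toNat + 32)).toNat ≤ 90 := Fin.mk_le_mk.mp hle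
      omega
    simp [h.1, h.2, hz]
  · rcases not_and_or.mp h with h' | h' <;> simp [h']
theorem misA_one (w : List Char) : ∀ (v : List Char) (i : Nat), i + v.length ≤ w.length →
    (misA w i v 1 ≤ 1 ↔ (w.drop i).take v.length = v) := by
  intro v
  induction v with
  | nil => intro i _; simp [misA]
  | cons c rest ih =>
    intro i hle
    have hi : i < w.length := by simp at hle; omega
    rw [List.drop_eq_getElem_cons hi]
    simp only [List.length_cons, List.take_succ_cons, misA]
    rw [List.getD_eq_getElem w ' ' hi]
    by_cases hc : w[i] = c
    · simp only [hc, ne_eq, not_true_eq_false, if_false, if_neg (by omega : ¬ (1:Nat) > 1)]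
      rw [ih (i+1) (by simp at hle ⊢; omega)]
      simp
    · simp [hc]
theorem nearB_def (w v : List Char) (i : Nat) : nearB w v i =
    (agreeLen w i v == v.length ||
     mySlice w (i + agreeLen w i v + 1) (i + v.length) == mySlice v (agreeLen w i v + 1) v.length) := rfl
theorem nearB_iff (w : List Char) : ∀ (v : List Char) (i : Nat), i + v.length ≤ w.length →
    (nearB w v i = true ↔ misA w i v 0 ≤ 1) := by
  intro v
  induction v with
  | nil => intro i _; simp [nearB_def, agreeLen, misA]
  | cons c rest ih =>
    intro i hle
    have hi : i < w.length := by simp at hle; omega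
    by_cases hc : w.getD i ' ' = c
    · have hc' : w[i]?.getD ' ' = c := hc
      have ha : agreeLen w i (c :: rest) = agreeLen w (i+1) rest + 1 := by
        simp [agreeLen, hc']
      have h1 : nearB w (c :: rest) i = nearB w rest (i+1) := by
        rw [nearB_def, nearB_def, ha]
        have e1 : i + (agreeLen w (i+1) rest + 1) + 1 = (i+1) + agreeLen w (i+1) rest + 1 := by omega
        have e2 : i + (c :: rest).length = (i+1) + rest.length := by simp; omega
        rw [e1, e2]
        have e3 : mySlice (c :: rest) (agreeLen w (i+1) rest + 1 + 1) (c :: rest).length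
            = mySlice rest (agreeLen w (i+1) rest + 1) rest.length := by
          simp [mySlice, Nat.succ_sub_succ]
        rw [e3]
        simp
      have h2 : misA w i (c :: rest) 0 = misA w (i+1) rest 0 := by
        simp [misA, hc']
      rw [h1, h2]
      exact ih (i+1) (by simp at hle ⊢; omega)
    · have hc' : ¬ (w[i]?.getD ' ' = c) := hc
      have h1 : misA w i (c :: rest) 0 = misA w (i+1) rest 1 := by
        simp [misA, hc']
      have ha : agreeLen w i (c :: rest) = 0 := by
        simp [agreeLen, hc']
      have h2 : nearB w (c :: rest) i = ((w.drop (i+1)).take rest.length == rest) := by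
        rw [nearB_def, ha]
        have e3 : mySlice (c :: rest) (0 + 1) (c :: rest).length = rest := by
          simp [mySlice]
        have e4 : mySlice w (i + 0 + 1) (i + (c :: rest).length) = (w.drop (i+1)).take rest.length := by
          simp [mySlice]
          congr 1
          omega
        rw [e3, e4]
        simp
      rw [h1, h2]
      rw [misA_one w rest (i+1) (by simp at hle ⊢; omega)]
      simp

def kA (w : List Char) (v : String) (i : Nat) : Nat :=
  (List.range' i (w.length - v.toList.length - i)).countP (fun x => decide (misA w x v.toList 0 ≤ 1))

theorem whileA_eq (w : List Char) (v : String) : ∀ (n i : Nat) (res : List String),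
    w.length - i ≤ n → whileA w v i res = res ++ List.replicate (kA w v i) v := by
  intro n
  induction n with
  | zero =>
    intro i res h
    rw [whileA, if_neg (by omega)]
    have h0 : w.length - v.toList.length - i = 0 := by omega
    unfold kA
    rw [h0]
    simp
  | succ n ih =>
    intro i res h
    rw [whileA]
    by_cases hlt : i + v.toList.length < w.length
    · rw [if_pos hlt]
      have hk : kA w v i = (if misA w i v.toList 0 ≤ 1 then 1 else 0) + kA w v (i+1) := by
        unfold kA
        have hd : w.length - v.toList.length - i = (w.length - v.toList.length - (i+1)) + 1 := by omega
        rw [hd, List.range'_succ, List.countP_cons]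
        by_cases hp : misA w i v.toList 0 ≤ 1
        · simp [hp]
          omega
        · simp [hp]
      rw [ih (i+1) _ (by omega), hk]
      have hcomm : ∀ k : Nat, 1 + k = k + 1 := fun k => Nat.add_comm 1 k
      by_cases hp : misA w i v.toList 0 ≤ 1
      · rw [if_pos hp]
        rcases Nat.le_one_iff_eq_zero_or_eq_one.mp hp with h0 | h1
        · rw [h0]
          simp [hcomm, List.replicate_succ]
        · rw [h1]
          simp [hcomm, List.replicate_succ]
      · have h1 : (misA w i v.toList 0 == 1) = false := by simp; omega
        have h0 : (misA w i v.toList 0 == 0) = false := by simp; omega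
        rw [h1, h0, if_neg hp]
        simp
    · rw [if_neg hlt]
      have h0 : w.length - v.toList.length - i = 0 := by omega
      unfold kA
      rw [h0]
      simp

theorem kA_pos_iff (w : List Char) (v : String) : 0 < kA w v 0 ↔ matchesB w v.toList = true := by
  unfold kA matchesB
  rw [List.countP_pos_iff, List.any_eq_true]
  constructor
  · rintro ⟨a, ha, hp⟩
    refine ⟨a, ?_, ?_⟩
    · rw [List.range_eq_range']; simpa using ha
    · have hb : a + v.toList.length ≤ w.length := by
        obtain ⟨j, hj, rfl⟩ := List.mem_range'.mp ha
        omega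
      exact (nearB_iff w v.toList a hb).mpr (by simpa using hp)
  · rintro ⟨a, ha, hp⟩
    have ha' : a < w.length - v.toList.length := by simpa using ha
    have hb : a + v.toList.length ≤ w.length := by omega
    refine ⟨a, ?_, ?_⟩
    · rw [List.mem_range']
      exact ⟨a, by omega, by omega⟩
    · simpa using (nearB_iff w v.toList a hb).mp hp
def maxRun (b : String) (l : List String) : String :=
  l.foldl (fun b r => if b.toList.length < r.toList.length then r else b) b

theorem step_step (b v : String) :
    (if (if b.toList.length < v.toList.length then v else b).toList.length < v.toList.length then v
     else (if b.toList.length < v.toList.length then v else b))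
    = (if b.toList.length < v.toList.length then v else b) := by
  by_cases h : b.toList.length < v.toList.length
  · rw [if_pos h, if_neg (lt_irrefl _)]
  · rw [if_neg h, if_neg h]

theorem maxRun_replicate (b v : String) : ∀ k : Nat, 0 < k →
    maxRun b (List.replicate k v) = if b.toList.length < v.toList.length then v else b := by
  intro k
  induction k generalizing b with
  | zero => omega
  | succ k ih =>
    intro _
    rw [List.replicate_succ]
    show maxRun (if b.toList.length < v.toList.length then v else b) (List.replicate k v) = _
    rcases Nat.eq_zero_or_pos k with hk | hk
    · subst hk; simp [maxRun]
    · rw [ih _ hk, step_step]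

theorem choose_pair (l : List String) : ∀ b : String,
    (l.foldl (fun (st : Nat × String) r =>
      if st.1 < r.toList.length then (r.toList.length, r) else st) (b.toList.length, b)).2 = maxRun b l := by
  induction l with
  | nil => intro b; rfl
  | cons r t ih =>
    intro b
    show (t.foldl _ (if b.toList.length < r.toList.length then (r.toList.length, r) else (b.toList.length, b))).2 = maxRun (if b.toList.length < r.toList.length then r else b) t
    by_cases h : b.toList.length < r.toList.length
    · simp only [h, if_pos]; exact ih r
    · simp only [h, if_false]; exact ih b

theorem empty_of_len_zero (h : String) (hh : h.toList.length = 0) : h = "" :=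
  String.toList_eq_nil_iff.mp (List.eq_nil_of_length_eq_zero hh)

theorem step_empty (h : String) :
    (if ("" : String).toList.length < h.toList.length then h else "") = h := by
  by_cases hl : ("" : String).toList.length < h.toList.length
  · rw [if_pos hl]
  · rw [if_neg hl]
    have : h.toList.length = 0 := by simpa using hl
    exact (empty_of_len_zero h this).symm

theorem branch_eq (res : List String) :
    (if res.length > 1 then choose_root res
     else if res.length == 1 then res.getD 0 ""
     else "") = maxRun "" res := by
  match res with
  | [] => rfl
  | [h] =>
    simp only [List.length_cons, List.length_nil]
    rw [if_neg (by omega), if_pos (by simp)]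
    show h = (if ("" : String).toList.length < h.toList.length then h else "")
    exact (step_empty h).symm
  | h :: x :: xs =>
    rw [if_pos (by simp)]
    have hcr : choose_root (h :: x :: xs) = maxRun h (h :: x :: xs) := choose_pair (h :: x :: xs) h
    rw [hcr]
    show maxRun (if h.toList.length < h.toList.length then h else h) (x :: xs) = _
    rw [show maxRun "" (h :: x :: xs) = maxRun (if ("" : String).toList.length < h.toList.length then h else "") (x :: xs) from rfl]
    rw [step_empty]
    simp
theorem lower_idem (l : List Char) : PySem.Chars.lower (PySem.Chars.lower l) = PySem.Chars.lower l := by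
  have h : PySem.Chars.lower = List.map PySem.Chars.lowerChar := rfl
  rw [h, List.map_map]
  exact List.map_congr_left fun c _ => lowerChar_idem c

theorem outer_main (lw : List Char) : ∀ (vocab : List String) (wd : String) (res : List String) (best : String),
    PySem.Chars.lower wd.toList = lw →
    best = maxRun "" res →
    maxRun "" (outerA vocab (wd, res)).2 =
      vocab.foldl (fun best v =>
        if best.toList.length < v.toList.length ∧ matchesB lw v.toList = true then v else best) best := by
  intro vocab
  induction vocab with
  | nil =>
    intro wd res best hlw hb
    simpa using hb.symm
  | cons v rest ih =>
    intro wd res best hlw hb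
    show maxRun "" (outerA rest (PySem.Str.lower wd, whileA (PySem.Str.lower wd).toList v 0 res)).2 = _
    have htl : (PySem.Str.lower wd).toList = lw := by
      rw [PySem.Str.toList_lower, hlw]
    rw [htl]
    have hres : whileA lw v 0 res = res ++ List.replicate (kA lw v 0) v :=
      whileA_eq lw v lw.length 0 res (by omega)
    have hb' : (if best.toList.length < v.toList.length ∧ matchesB lw v.toList = true then v else best)
        = maxRun "" (whileA lw v 0 res) := by
      rw [hres]
      rw [show maxRun "" (res ++ List.replicate (kA lw v 0) v)
            = maxRun (maxRun "" res) (List.replicate (kA lw v 0) v) from List.foldl_append ..]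
      rw [← hb]
      rcases Nat.eq_zero_or_pos (kA lw v 0) with hk | hk
      · have hm : matchesB lw v.toList = false := by
          rw [← Bool.not_eq_true]
          intro hmt
          have hpos := (kA_pos_iff lw v).mpr hmt
          omega
        simp [hk, hm, maxRun]
      · have hm : matchesB lw v.toList = true := (kA_pos_iff lw v).mp hk
        rw [maxRun_replicate best v _ hk]
        by_cases hlen : best.toList.length < v.toList.length
        · rw [if_pos ⟨hlen, hm⟩, if_pos hlen]
        · rw [if_neg (by tauto), if_neg hlen]
    have hlw' : PySem.Chars.lower (PySem.Str.lower wd).toList = lw := by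
      rw [PySem.Str.toList_lower, hlw, ← hlw, lower_idem, hlw]
    rw [ih (PySem.Str.lower wd) (whileA lw v 0 res) _ hlw' hb']
    rfl
theorem final (word : String) (vocabulary : List String) :
    checkable word vocabulary = checkable_alt word vocabulary := by
  have h1 : checkable word vocabulary =
      (if (outerA vocabulary (word, [])).2.length > 1 then choose_root (outerA vocabulary (word, [])).2
       else if (outerA vocabulary (word, [])).2.length == 1 then (outerA vocabulary (word, [])).2.getD 0 ""
       else "") := rfl
  rw [h1, branch_eq]
  rw [outer_main ((PySem.Str.lower word).toList) vocabulary word [] ""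
    (PySem.Str.toList_lower word).symm rfl]
  rfl

-- ===== VERDICT (by name: the statement is the Claim_ definition above) =====
theorem checkable_spec : Claim_equal_checkable := by
  intro word vocabulary _
  unfold Spec_checkable
  exact final word vocabulary
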